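-- pv_equiv track=rewrite | github.com/gaboza12/we-are-algorithm | 724thomas/Week4 Tree/4315.py | solution
-- ===== SOURCE A (Python) =====
-- from collections import defaultdict
--
-- def solution(n, marbles, edges):
--     graph = defaultdict(list)
--     marbles = {arr[0] : arr[1] for arr in marbles}
--     visited = set()
--     for u, v in edges:
--         graph[u].append(v)
--         visited.add(v)
--     ans = [0]
--
--     def find_root():
--         for i in range(1, n + 1):
--             if i not in visited:
--                 return i
--
--     def dfs(node):
--         temp = 0
--         for child in graph[node]:
--             temp += dfs(child)
--         total = temp + marbles[node] - 1
--         ans[0] += abs(total)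
--         return total
--
--     root = find_root()
--     dfs(root)
--     return ans[0]
-- ===== SOURCE B (Python) =====
-- def solution(n, marbles, edges):
--     def kids(node):
--         return [e[1] for e in edges if e[0] == node]
--
--     def value(node):
--         for arr in reversed(marbles):
--             if arr[0] == node:
--                 return arr[1]
--
--     targets = [e[1] for e in edges]
--     root = None
--     for i in range(1, n + 1):
--         if i not in targets:
--             root = i
--             break
--     ans = 0
--     stack = [(root, 0, 0)]
--     while stack:
--         node, idx, acc = stack.pop()
--         ks = kids(node)
--         if idx < len(ks):
--             stack.append((node, idx + 1, acc))
--             stack.append((ks[idx], 0, 0))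
--         else:
--             total = acc + value(node) - 1
--             ans += abs(total)
--             if stack:
--                 p, pidx, pacc = stack.pop()
--                 stack.append((p, pidx, pacc + total))
--     return ans
-- ===== Notes on version B (the rewrite author's own statement) =====
-- stated objective: alternative
-- what changed: A does recursive root-to-leaves DFS over a defaultdict adjacency map, a marble dict and a visited set; B builds no dict or set at all: it finds children by an on-demand scan of the edge list, the marble value by a reverse scan of the marble list, and replaces the recursion by an iterative post-order loop over an explicit stack of (node, next-child-index, accumulated-subtree-sum) frames; this trades dict bookkeeping for per-node list scans.
import Mathlib
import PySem

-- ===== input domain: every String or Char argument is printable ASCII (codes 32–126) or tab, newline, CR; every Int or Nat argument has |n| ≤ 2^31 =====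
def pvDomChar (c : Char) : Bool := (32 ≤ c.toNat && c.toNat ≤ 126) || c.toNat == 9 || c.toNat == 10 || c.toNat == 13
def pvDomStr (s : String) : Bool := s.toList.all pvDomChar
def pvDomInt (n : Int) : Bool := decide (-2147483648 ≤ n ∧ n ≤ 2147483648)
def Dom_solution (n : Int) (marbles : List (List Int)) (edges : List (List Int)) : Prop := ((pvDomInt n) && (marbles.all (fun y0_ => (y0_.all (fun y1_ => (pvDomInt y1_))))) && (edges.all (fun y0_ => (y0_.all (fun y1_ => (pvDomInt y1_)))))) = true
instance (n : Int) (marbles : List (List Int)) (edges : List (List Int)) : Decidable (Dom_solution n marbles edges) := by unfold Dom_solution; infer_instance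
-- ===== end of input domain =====

-- B replaces A's recursive DFS over a defaultdict/dict/set by a dict-free, explicit-stack
-- post-order loop: children and marble values are found by scanning the raw input lists;
-- return values agree on Pre_ (no side effects involved).

-- ===== PORT A =====
-- marbles = {arr[0] : arr[1] for arr in marbles}
def marbleDictA (marbles : List (List Int)) : PySem.Dict Int Int :=
  marbles.foldl (fun d arr => match arr with | a :: b :: _ => d.insert a b | _ => d) PySem.Dict.empty

-- graph[u].append(v)  (defaultdict(list))
def graphStepA (d : PySem.Dict Int (List Int)) (e : List Int) : PySem.Dict Int (List Int) :=
  match e with | [u, v] => d.modify u [] (· ++ [v]) | _ => d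

-- visited.add(v)
def childStepA (s : PySem.Set Int) (e : List Int) : PySem.Set Int :=
  match e with | [_, v] => PySem.Set.add s v | _ => s

-- def dfs(node): returns (total, amount added to ans[0]); ans[0] is threaded as the second
-- component.  Fuel (recursion depth) is a totality guard only: Pre_ bounds the depth by
-- edges.length + 1, so the 0-fuel branch is never reached on admitted inputs.
def dfsA (g : PySem.Dict Int (List Int)) (m : PySem.Dict Int Int) : Nat → Int → Int × Int
  | 0, _ => (0, 0)
  | f + 1, node =>
    let kids := g.getD node []
    let r := kids.foldl (fun p c => (p.1 + (dfsA g m f c).1, p.2 + (dfsA g m f c).2)) ((0 : Int), (0 : Int))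
    let total := r.1 + m.getD node 0 - 1
    (total, r.2 + |total|)

-- find_root(): 'for i in range(1, n+1): if i not in visited: return i' — an early-exit
-- scan (the fuel k counts the indices left in the range, exactly Python's lazy loop)
def findRootA (s : PySem.Set Int) : Int → Nat → Option Int
  | _, 0 => none
  | i, k + 1 => if !(PySem.Set.contains s i) then some i else findRootA s (i + 1) k

def solution (n : Int) (marbles : List (List Int)) (edges : List (List Int)) : Int :=
  let m := marbleDictA marbles
  let st := edges.foldl (fun st e => (graphStepA st.1 e, childStepA st.2 e))
      (PySem.Dict.empty, PySem.Set.empty)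
  match findRootA st.2 1 (max n 0).toNat with
  | none => 0            -- Python: root is None, dfs raises KeyError — excluded by Pre_
  | some r => (dfsA st.1 m (edges.length + 2) r).2

-- ===== PORT B =====
-- def kids(node): [e[1] for e in edges if e[0] == node]  (on-demand scan, no dict)
def kidsB (edges : List (List Int)) (node : Int) : List Int :=
  edges.filterMap (fun e =>
    if PySem.List.pyGet? e 0 = some node then PySem.List.pyGet? e 1 else none)

-- def value(node): reverse scan of the raw marble list (last entry wins); a missing key
-- makes the Python raise (None propagates into '+'), so the defaults are outside Pre_
def valueB (marbles : List (List Int)) (node : Int) : Int :=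
  match marbles.reverse.find? (fun a => decide (PySem.List.pyGet? a 0 = some node)) with
  | some a => (PySem.List.pyGet? a 1).getD 0
  | none => 0

-- targets = [e[1] for e in edges]
def targetsB (edges : List (List Int)) : List Int :=
  edges.filterMap (fun e => PySem.List.pyGet? e 1)

-- "if stack: p, pidx, pacc = stack.pop(); stack.append((p, pidx, pacc + total))"
def popAdd (t : Int) : List (Int × Nat × Int) → List (Int × Nat × Int)
  | [] => []
  | (p, pidx, pacc) :: rs => (p, pidx, pacc + t) :: rs

-- the while-loop; the list head is the top of the Python stack; K/M are the kids/value
-- closures.  Fuel is a totality guard only: Pre_ guarantees termination, and the fuel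
-- passed in solution_alt exceeds the number of iterations performed on admitted inputs.
def loopB (K : Int → List Int) (M : Int → Int) :
    Nat → List (Int × Nat × Int) → Int → Int
  | _, [], ans => ans
  | 0, _, ans => ans
  | f + 1, (node, idx, acc) :: rest, ans =>
    let ks := K node
    if idx < ks.length then
      loopB K M f ((ks.getD idx 0, 0, 0) :: (node, idx + 1, acc) :: rest) ans
    else
      let total := acc + M node - 1
      loopB K M f (popAdd total rest) (ans + |total|)

def fuelB (edges : List (List Int)) : Nat := 2 * (edges.length + 2) ^ (edges.length + 2)

-- the same 'for i in range(1, n+1)' loop of Source B, over the targets list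
def findRootB (t : List Int) : Int → Nat → Option Int
  | _, 0 => none
  | i, k + 1 => if !(t.contains i) then some i else findRootB t (i + 1) k

def solution_alt (n : Int) (marbles : List (List Int)) (edges : List (List Int)) : Int :=
  match findRootB (targetsB edges) 1 (max n 0).toNat with
  | none => 0            -- Python: root is None, value(None) raises — excluded by Pre_
  | some r => loopB (kidsB edges) (valueB marbles) (fuelB edges) [(r, 0, 0)] 0

-- ===== PRECONDITION & SPEC =====
-- closed-form helpers on the raw input (they do not touch the ports)
def childrenE (edges : List (List Int)) (v : Int) : List Int :=
  edges.filterMap (fun e => match e with | [u, w] => if u = v then some w else none | _ => none)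

def childTargets (edges : List (List Int)) : List Int :=
  edges.filterMap (fun e => match e with | [_, w] => some w | _ => none)

-- all directed walks from v have length < f (no cycle reachable from v)
def goodP (edges : List (List Int)) : Nat → Int → Bool
  | 0, _ => false
  | f + 1, v => (childrenE edges v).all (fun c => goodP edges f c)

-- every node reachable from v within f steps (with multiplicity)
def reachP (edges : List (List Int)) : Nat → Int → List Int
  | 0, v => [v]
  | f + 1, v => v :: (childrenE edges v).flatMap (fun c => reachP edges f c)

def keysE (marbles : List (List Int)) : List Int := marbles.filterMap (fun arr => arr.head?)

-- first i in 1..n not a child target; early-exit scan (k bounds the remaining indices)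
def rootScan (t : List Int) : Int → Nat → Option Int
  | _, 0 => none
  | i, k + 1 => if !(t.contains i) then some i else rootScan t (i + 1) k

def rootE (n : Int) (edges : List (List Int)) : Option Int :=
  rootScan (childTargets edges) 1 (max n 0).toNat

-- Pre_ excludes exactly the inputs where the Python raises: an edge not of length 2
-- (ValueError on unpacking), a marble entry of length < 2 (IndexError), no root in 1..n
-- (KeyError on None), a cycle reachable from the root (unbounded recursion), or a node
-- reachable from the root without a marble entry (KeyError).  Python's finite recursion
-- limit itself is not modelled.
def Pre_solution (n : Int) (marbles : List (List Int)) (edges : List (List Int)) : Prop :=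
  (∀ e ∈ edges, e.length = 2) ∧ (∀ a ∈ marbles, 2 ≤ a.length) ∧
  (rootE n edges).isSome = true ∧
  goodP edges (edges.length + 1) ((rootE n edges).getD 0) = true ∧
  (∀ w ∈ reachP edges (edges.length + 1) ((rootE n edges).getD 0), w ∈ keysE marbles)

instance (n : Int) (marbles : List (List Int)) (edges : List (List Int)) : Decidable (Pre_solution n marbles edges) := by
  unfold Pre_solution; infer_instance

def pvWitness_solution : Int × List (List Int) × List (List Int) :=
  (3, [[1, 2], [2, 0], [3, 1]], [[1, 2], [1, 3]])

def Spec_solution (n : Int) (marbles : List (List Int)) (edges : List (List Int)) (out : Int) : Prop := out = solution_alt n marbles edges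
instance (n : Int) (marbles : List (List Int)) (edges : List (List Int)) (out : Int) : Decidable (Spec_solution n marbles edges out) := by unfold Spec_solution; infer_instance

-- ===== CLAIM (what is proved, stated in full; the proofs are below) =====
def Claim_equal_solution : Prop := ∀ (n : Int) (marbles : List (List Int)) (edges : List (List Int)), Dom_solution n marbles edges → Pre_solution n marbles edges → Spec_solution n marbles edges (solution n marbles edges)

-- ===== LEMMAS AND PROOFS =====

-- proof-side mirrors of goodP / dfs / iteration counts over abstract kids/value closures
def goodG (K : Int → List Int) : Nat → Int → Bool
  | 0, _ => false
  | f + 1, v => (K v).all (fun c => goodG K f c)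

def dfsS (K : Int → List Int) (M : Int → Int) : Nat → Int → Int × Int
  | 0, _ => (0, 0)
  | f + 1, node =>
    let r := (K node).foldl (fun p c => (p.1 + (dfsS K M f c).1, p.2 + (dfsS K M f c).2)) ((0 : Int), (0 : Int))
    let total := r.1 + M node - 1
    (total, r.2 + |total|)

def needF (K : Int → List Int) : Nat → Int → Nat
  | 0, _ => 1
  | f + 1, v => 1 + ((K v).map (fun c => 1 + needF K f c)).sum

def needL (K : Int → List Int) (f : Nat) (l : List Int) : Nat :=
  1 + (l.map (fun c => 1 + needF K f c)).sum

theorem findRootA_eq (s : PySem.Set Int) (t : List Int)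
    (h : ∀ j, PySem.Set.contains s j = t.contains j) :
    ∀ (k : Nat) (i : Int), findRootA s i k = rootScan t i k := by
  intro k
  induction k with
  | zero => intro i; rfl
  | succ k ih => intro i; simp only [findRootA, rootScan, h, ih]

theorem findRootB_eq (t : List Int) :
    ∀ (k : Nat) (i : Int), findRootB t i k = rootScan t i k := by
  intro k
  induction k with
  | zero => intro i; rfl
  | succ k ih => intro i; simp only [findRootB, rootScan, ih]

theorem loopB_nil (K : Int → List Int) (M : Int → Int) (k : Nat) (a : Int) :
    loopB K M k [] a = a := by cases k <;> simp [loopB]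

theorem dfsA_eq_dfsS (g : PySem.Dict Int (List Int)) (m : PySem.Dict Int Int) :
    ∀ f v, dfsA g m f v = dfsS (fun v => g.getD v []) (fun v => m.getD v 0) f v := by
  intro f
  induction f with
  | zero => intro v; rfl
  | succ f ih =>
    intro v
    simp only [dfsA, dfsS]
    rw [List.foldl_ext _ _ _ (fun p c hc => by rw [ih c])]

theorem graph_getD (edges : List (List Int)) (d : PySem.Dict Int (List Int)) (v : Int) :
    (edges.foldl graphStepA d).getD v [] = d.getD v [] ++ childrenE edges v := by
  induction edges generalizing d with
  | nil => simp [childrenE]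
  | cons e es ih =>
    rcases e with _ | ⟨u, _ | ⟨w, _ | ⟨x, t⟩⟩⟩ <;>
      simp only [List.foldl_cons, childrenE, List.filterMap_cons, graphStepA, ih]
    rw [PySem.Dict.modify, PySem.Dict.getD_insert]
    by_cases h : u = v
    · subst h; simp
    · simp [h, Ne.symm h]

theorem contains_fold (edges : List (List Int)) (s : PySem.Set Int) (i : Int) :
    (PySem.Set.contains (edges.foldl childStepA s) i)
      = (PySem.Set.contains s i || (childTargets edges).contains i) := by
  induction edges generalizing s with
  | nil => simp [childTargets]
  | cons e es ih =>
    rcases e with _ | ⟨u, _ | ⟨w, _ | ⟨x, t⟩⟩⟩ <;>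
      simp only [List.foldl_cons, childTargets, List.filterMap_cons, childStepA, ih]
    · rw [Bool.eq_iff_iff]
      simp [PySem.Set.mem_add]
      tauto

theorem pyGet_cons0 (u : Int) (t : List Int) : PySem.List.pyGet? (u :: t) 0 = some u := by
  simp [PySem.List.pyGet?, PySem.List.pyIdx?]

theorem pyGet_cons1 (u w : Int) (t : List Int) : PySem.List.pyGet? (u :: w :: t) 1 = some w := by
  simp [PySem.List.pyGet?, PySem.List.pyIdx?]

theorem kidsB_eq (edges : List (List Int)) (h : ∀ e ∈ edges, e.length = 2) (v : Int) :
    kidsB edges v = childrenE edges v := by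
  induction edges with
  | nil => rfl
  | cons e es ih =>
    have he : e.length = 2 := h e (by simp)
    rcases e with _ | ⟨u, _ | ⟨w, _ | ⟨x, t⟩⟩⟩ <;> simp at he
    have ih' := ih (fun e he => h e (by simp [he]))
    simp only [kidsB, childrenE, List.filterMap_cons, pyGet_cons0, pyGet_cons1,
      Option.some.injEq] at ih' ⊢
    by_cases hu : u = v <;> simp [hu, ih']

theorem targetsB_eq (edges : List (List Int)) (h : ∀ e ∈ edges, e.length = 2) :
    targetsB edges = childTargets edges := by
  induction edges with
  | nil => rfl
  | cons e es ih =>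
    have he : e.length = 2 := h e (by simp)
    rcases e with _ | ⟨u, _ | ⟨w, _ | ⟨x, t⟩⟩⟩ <;> simp at he
    have ih' := ih (fun e he => h e (by simp [he]))
    simp only [targetsB, childTargets, List.filterMap_cons, pyGet_cons1] at ih' ⊢
    simp [ih']

theorem valueB_eq (marbles : List (List Int)) (h : ∀ a ∈ marbles, 2 ≤ a.length) (v : Int) :
    valueB marbles v = (marbleDictA marbles).getD v 0 := by
  induction marbles using List.reverseRecOn with
  | nil => simp [valueB, marbleDictA, PySem.Dict.getD_empty]
  | append_singleton ms a ih =>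
    have ha : 2 ≤ a.length := h a (by simp)
    rcases a with _ | ⟨a0, _ | ⟨a1, t⟩⟩ <;> simp at ha
    have ih' := ih (fun x hx => h x (by simp [hx]))
    simp only [valueB, marbleDictA, List.reverse_append, List.reverse_singleton,
      List.singleton_append, List.find?_cons, List.foldl_append, List.foldl_cons,
      List.foldl_nil, pyGet_cons0, Option.some.injEq] at ih' ⊢
    rw [PySem.Dict.getD_insert]
    by_cases hv : a0 = v
    · subst hv; simp
    · simp [hv, Ne.symm hv, ih']

theorem all_congr_mem (l : List Int) (f g : Int → Bool) (h : ∀ c ∈ l, f c = g c) :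
    l.all f = l.all g := by
  induction l with
  | nil => rfl
  | cons c cs ih => simp [List.all_cons, h c (by simp), ih (fun x hx => h x (by simp [hx]))]

theorem goodP_eq_goodG (edges : List (List Int)) (f : Nat) (v : Int) :
    goodP edges f v = goodG (childrenE edges) f v := by
  induction f generalizing v with
  | zero => rfl
  | succ f ih =>
    simp only [goodP, goodG]
    exact all_congr_mem _ _ _ (fun c _ => ih c)

theorem goodG_mono (K : Int → List Int) :
    ∀ f f' v, f ≤ f' → goodG K f v = true → goodG K f' v = true := by
  intro f
  induction f with
  | zero => intro f' v _ h; simp [goodG] at h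
  | succ f ih =>
    intro f' v hle h
    rcases f' with _ | f'
    · omega
    simp only [goodG, List.all_eq_true] at h ⊢
    exact fun c hc => ih f' c (by omega) (h c hc)

theorem dfsS_stab (K : Int → List Int) (M : Int → Int) :
    ∀ f f' v, goodG K f v = true → goodG K f' v = true → dfsS K M f v = dfsS K M f' v := by
  intro f
  induction f with
  | zero => intro f' v h; simp [goodG] at h
  | succ f ih =>
    intro f' v h h'
    rcases f' with _ | f'
    · simp [goodG] at h'
    simp only [goodG, List.all_eq_true] at h h'
    simp only [dfsS]
    have : ∀ c ∈ K v, dfsS K M f c = dfsS K M f' c :=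
      fun c hc => ih f' c (h c hc) (h' c hc)
    rw [List.foldl_ext _ _ _ (fun p c hc => by rw [this c hc])]

theorem needF_le (K : Int → List Int) (E : Nat)
    (hlen : ∀ v, (K v).length ≤ E) :
    ∀ f v, needF K f v ≤ 2 * (E + 2) ^ f - 1 := by
  intro f
  induction f with
  | zero => intro v; simp [needF]
  | succ f ih =>
    intro v
    have hP : 1 ≤ (E + 2) ^ f := Nat.one_le_pow _ _ (by omega)
    have hsum : ((K v).map (fun c => 1 + needF K f c)).sum
        ≤ (K v).length * (2 * (E + 2) ^ f) := by
      calc ((K v).map (fun c => 1 + needF K f c)).sum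
          ≤ ((K v).map (fun c => 1 + needF K f c)).length • (2 * (E + 2) ^ f) := by
            apply List.sum_le_card_nsmul
            intro x hx
            rcases List.mem_map.mp hx with ⟨c, _, rfl⟩
            have := ih c
            omega
        _ = (K v).length * (2 * (E + 2) ^ f) := by simp [smul_eq_mul]
    have hlenv := hlen v
    have : needF K (f+1) v ≤ 1 + E * (2 * (E + 2) ^ f) := by
      simp only [needF]
      have : (K v).length * (2 * (E + 2) ^ f) ≤ E * (2 * (E + 2) ^ f) :=
        Nat.mul_le_mul_right _ hlenv
      omega
    have hpow : 2 * (E + 2) ^ (f + 1) = 2 * E * (E + 2) ^ f + 4 * (E + 2) ^ f := by ring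
    have h2 : needF K (f + 1) v + 1 ≤ 2 * (E + 2) ^ (f + 1) := by
      rw [hpow]; nlinarith [hP]
    omega

theorem getD_of_drop (l : List Int) (i : Nat) (c : Int) (l' : List Int) (h : l.drop i = c :: l') : l.getD i 0 = c := by
  have h0 : l[i]? = some c := by
    have h1 : (List.drop i l)[0]? = l[i+0]? := List.getElem?_drop
    rw [h] at h1; simpa using h1.symm
  simp [List.getD_eq_getElem?_getD, h0]

theorem drop_succ_of_drop (l : List Int) (i : Nat) (c : Int) (l' : List Int) (h : l.drop i = c :: l') : l.drop (i+1) = l' := by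
  rw [← List.tail_drop, h]; rfl

theorem dfsS_succ (K : Int → List Int) (M : Int → Int) (f : Nat) (v : Int) :
    dfsS K M (f + 1) v =
      (((K v).map (fun c => (dfsS K M f c).1)).sum + M v - 1,
       ((K v).map (fun c => (dfsS K M f c).2)).sum
         + |((K v).map (fun c => (dfsS K M f c).1)).sum + M v - 1|) := by
  simp only [dfsS]
  rw [PySem.List.foldl_prod_mk (fun s c => s + (dfsS K M f c).1) (fun s c => s + (dfsS K M f c).2)]
  simp [PySem.List.foldl_add]

theorem loop_sim (K : Int → List Int) (M : Int → Int) :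
    ∀ (f : Nat) (l : List Int) (v : Int) (idx : Nat) (acc : Int)
      (rest : List (Int × Nat × Int)) (ans : Int) (k : Nat),
      (K v).drop idx = l → (∀ c ∈ l, goodG K f c = true) →
      loopB K M (needL K f l + k) ((v, idx, acc) :: rest) ans =
        loopB K M k
          (popAdd (acc + (l.map (fun c => (dfsS K M f c).1)).sum + M v - 1) rest)
          (ans + (l.map (fun c => (dfsS K M f c).2)).sum
             + |acc + (l.map (fun c => (dfsS K M f c).1)).sum + M v - 1|) := by
  intro f
  induction f using Nat.strong_induction_on with
  | _ f IHf =>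
  intro l
  induction l with
  | nil =>
    intro v idx acc rest ans k hdrop _
    have hlen : (K v).length ≤ idx := List.drop_eq_nil_iff.mp hdrop
    have h1 : needL K f [] + k = k + 1 := by simp [needL]; omega
    rw [h1]
    simp only [loopB]
    rw [if_neg (by omega)]
    simp
  | cons c l' IHl =>
    intro v idx acc rest ans k hdrop hgood
    have hidx : idx < (K v).length := by
      by_contra h
      rw [List.drop_eq_nil_iff.mpr (by omega)] at hdrop
      exact absurd hdrop (by simp)
    have hget := getD_of_drop _ _ _ _ hdrop
    have hdrop' := drop_succ_of_drop _ _ _ _ hdrop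
    have hgc : goodG K f c = true := hgood c (by simp)
    rcases f with _ | f'
    · simp [goodG] at hgc
    have hfuel : needL K (f' + 1) (c :: l') + k
        = (needF K (f' + 1) c + (needL K (f' + 1) l' + k)) + 1 := by
      simp [needL, needF]; omega
    rw [hfuel]
    simp only [loopB]
    rw [if_pos hidx, hget]
    have hchild : needF K (f' + 1) c = needL K f' (K c) := by
      simp [needF, needL]
    rw [show needF K (f' + 1) c + (needL K (f' + 1) l' + k)
        = needL K f' (K c) + (needL K (f' + 1) l' + k) by omega]
    have hgkids : ∀ x ∈ K c, goodG K f' x = true := by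
      have := hgc
      simp only [goodG, List.all_eq_true] at this
      exact this
    rw [IHf f' (by omega) (K c) c 0 0 ((v, idx + 1, acc) :: rest) ans
        (needL K (f' + 1) l' + k) (by simp) hgkids]
    conv_lhs => simp only [popAdd]
    have hA2 : ans + ((K c).map (fun x => (dfsS K M f' x).2)).sum
         + |(0 : Int) + ((K c).map (fun x => (dfsS K M f' x).1)).sum + M c - 1|
        = ans + (dfsS K M (f' + 1) c).2 := by
      rw [dfsS_succ]; simp only [zero_add]; ring
    have hS : (0 : Int) + ((K c).map (fun x => (dfsS K M f' x).1)).sum + M c - 1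
        = (dfsS K M (f' + 1) c).1 := by
      rw [dfsS_succ]; simp
    rw [hA2, hS]
    rw [IHl v (idx + 1) (acc + (dfsS K M (f' + 1) c).1) rest (ans + (dfsS K M (f' + 1) c).2)
        k hdrop' (fun x hx => hgood x (by simp [hx]))]
    have hX : acc + (dfsS K M (f' + 1) c).1 + (l'.map (fun x => (dfsS K M (f' + 1) x).1)).sum + M v - 1
        = acc + ((c :: l').map (fun x => (dfsS K M (f' + 1) x).1)).sum + M v - 1 := by
      simp only [List.map_cons, List.sum_cons]; ring
    rw [hX]
    congr 1
    simp only [List.map_cons, List.sum_cons]; ring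

-- ===== VERDICT (by name: the statement is the Claim_ definition above) =====
theorem solution_spec : Claim_equal_solution := by
  intro n marbles edges _ hpre
  obtain ⟨hlen2, hm2, hsome, hgood, -⟩ := hpre
  unfold Spec_solution solution solution_alt
  rw [PySem.List.foldl_prod_mk graphStepA childStepA]
  simp only []
  set E := edges.length with hE
  set gd := edges.foldl graphStepA PySem.Dict.empty with hgd
  set md := marbleDictA marbles with hmd
  have hA : findRootA (edges.foldl childStepA PySem.Set.empty) 1 (max n 0).toNat
      = rootE n edges := by
    apply findRootA_eq
    intro j
    rw [contains_fold]
    simp [PySem.Set.empty]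
  rw [hA, targetsB_eq edges hlen2, findRootB_eq, show rootScan (childTargets edges) 1 (max n 0).toNat = rootE n edges from rfl]
  obtain ⟨r, hr⟩ := Option.isSome_iff_exists.mp hsome
  rw [hr]
  simp only []
  rw [hr] at hgood
  simp only [Option.getD_some] at hgood
  -- B's closures coincide with the characterisations over the raw input
  have hK : kidsB edges = childrenE edges := funext (kidsB_eq edges hlen2)
  have hM : valueB marbles = fun v => md.getD v 0 := funext (valueB_eq marbles hm2)
  rw [hK, hM]
  set K := childrenE edges with hKdef
  have hgoodG : goodG K (E + 1) r = true := by
    rw [← goodP_eq_goodG]; exact hgood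
  have hkidsgood : ∀ c ∈ K r, goodG K E c = true := by
    have h := hgoodG
    simp only [goodG, List.all_eq_true] at h
    exact h
  have hlen : ∀ v, (K v).length ≤ E := by
    intro v
    rw [hKdef]
    simp only [childrenE]
    exact List.length_filterMap_le _ _
  have hneed : needL K E (K r) ≤ fuelB edges := by
    have h2 := needF_le K E hlen (E + 1) r
    have heq : needL K E (K r) = needF K (E + 1) r := by simp [needL, needF]
    have h3 : 2 * (E + 2) ^ (E + 1) ≤ 2 * (E + 2) ^ (E + 2) :=
      Nat.mul_le_mul_left _ (Nat.pow_le_pow_right (by omega) (by omega))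
    have h4 : fuelB edges = 2 * (E + 2) ^ (E + 2) := rfl
    omega
  obtain ⟨k, hk⟩ : ∃ k, fuelB edges = needL K E (K r) + k :=
    ⟨fuelB edges - needL K E (K r), by omega⟩
  rw [hk, loop_sim K (fun v => md.getD v 0) E (K r) r 0 0 [] 0 k rfl hkidsgood]
  simp only [popAdd]
  rw [loopB_nil]
  -- A's dfs over the built dicts is dfsS over the same closures
  have hgK : (fun v => gd.getD v []) = K := by
    funext v
    rw [hgd, graph_getD, hKdef]
    simp [PySem.Dict.getD_empty]
  rw [dfsA_eq_dfsS, hgK]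
  rw [show E + 2 = (E + 1) + 1 from rfl, dfsS_succ]
  have hmc : ∀ c ∈ K r, dfsS K (fun v => md.getD v 0) (E + 1) c = dfsS K (fun v => md.getD v 0) E c := fun c hc =>
    dfsS_stab K _ (E + 1) E c
      (goodG_mono K E (E + 1) c (by omega) (hkidsgood c hc)) (hkidsgood c hc)
  rw [List.map_congr_left (l := K r) (f := fun c => (dfsS K (fun v => md.getD v 0) (E + 1) c).1)
        (g := fun c => (dfsS K (fun v => md.getD v 0) E c).1)
        (fun c hc => by
          show (dfsS K (fun v => md.getD v 0) (E + 1) c).1 = (dfsS K (fun v => md.getD v 0) E c).1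
          rw [hmc c hc]),
      List.map_congr_left (l := K r) (f := fun c => (dfsS K (fun v => md.getD v 0) (E + 1) c).2)
        (g := fun c => (dfsS K (fun v => md.getD v 0) E c).2)
        (fun c hc => by
          show (dfsS K (fun v => md.getD v 0) (E + 1) c).2 = (dfsS K (fun v => md.getD v 0) E c).2
          rw [hmc c hc])]
  simp
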